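-- pv_equiv track=rewrite | github.com/JamesMcClung/rollpy | main.py | expand_delimiters
-- ===== SOURCE A (Python) =====
-- def expand_delimiters(arg: str, delimiters: list) -> list:
--     """Partitions the given arg into a list of subarguments using the given delimiters, which are included in the resulting list."""
--     out = [""]
--     for c in arg:
--         if c in delimiters:
--             out += [c, ""]
--         else:
--             out[-1] += c
--     return [a for a in out if a] # remove empty strings
-- ===== SOURCE B (Python) =====
-- def expand_delimiters(arg: str, delimiters: list) -> list:
--     """Partitions the given arg into a list of subarguments using the given delimiters, which are included in the resulting list."""
--     res = []
--     i = 0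
--     n = len(arg)
--     while i < n:
--         c = arg[i]
--         if c in delimiters:
--             res.append(c)
--             i += 1
--         else:
--             j = i + 1
--             while j < n and arg[j] not in delimiters:
--                 j += 1
--             res.append(arg[i:j])
--             i = j
--     return res
-- ===== Notes on version B (the rewrite author's own statement) =====
-- stated objective: alternative
-- what changed: B scans maximal runs of non-delimiter characters with an index two-pointer loop and slices each run out as one token, instead of growing a char-by-char accumulator list with a trailing empty string and filtering empties at the end.
import Mathlib
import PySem

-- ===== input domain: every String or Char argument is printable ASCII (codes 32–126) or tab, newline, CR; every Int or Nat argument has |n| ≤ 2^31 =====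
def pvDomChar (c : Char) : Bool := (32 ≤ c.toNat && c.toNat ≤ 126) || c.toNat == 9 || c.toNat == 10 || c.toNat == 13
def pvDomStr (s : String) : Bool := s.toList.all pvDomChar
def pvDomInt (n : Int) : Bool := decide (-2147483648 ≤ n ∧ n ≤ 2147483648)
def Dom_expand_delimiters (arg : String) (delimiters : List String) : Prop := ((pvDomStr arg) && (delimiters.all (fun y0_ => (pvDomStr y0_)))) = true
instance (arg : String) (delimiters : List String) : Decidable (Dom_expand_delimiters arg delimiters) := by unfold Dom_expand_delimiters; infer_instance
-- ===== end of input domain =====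

-- B tokenizes by scanning maximal non-delimiter runs instead of A's grow-last-string-and-filter loop; alternative decomposition, same cost.

-- ===== PORT A =====
-- out[-1] += c : append the char to the last string of the list
def aAddLast : List String → Char → List String
  | [], _ => []
  | [s], c => [s.push c]
  | s :: t, c => s :: aAddLast t c

def aStep (delimiters : List String) (out : List String) (c : Char) : List String :=
  if delimiters.contains (String.ofList [c]) then out ++ [String.ofList [c], ""]
  else aAddLast out c

def expand_delimiters (arg : String) (delimiters : List String) : List String :=
  (arg.toList.foldl (aStep delimiters) [""]).filter (fun a => a != "")

-- ===== PORT B =====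
-- inner while loop of Source B: the maximal run of non-delimiter chars, and the remainder
def altRun (delimiters : List String) : List Char → List Char × List Char
  | [] => ([], [])
  | c :: rest =>
    if delimiters.contains (String.ofList [c]) then ([], c :: rest)
    else ((c :: (altRun delimiters rest).1), (altRun delimiters rest).2)

-- cited by altGo's decreasing_by, so it stays above the port
theorem altRun_snd_length (delimiters : List String) (l : List Char) :
    (altRun delimiters l).2.length ≤ l.length := by
  induction l with
  | nil => simp [altRun]
  | cons c rest ih =>
    by_cases h : String.ofList [c] ∈ delimiters <;> simp [altRun, h] <;> omega  -- h resolves the branch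

-- outer while loop of Source B
def altGo (delimiters : List String) : List Char → List String
  | [] => []
  | c :: rest =>
    if delimiters.contains (String.ofList [c]) then
      String.ofList [c] :: altGo delimiters rest
    else
      String.ofList (c :: (altRun delimiters rest).1) :: altGo delimiters (altRun delimiters rest).2
termination_by l => l.length
decreasing_by
  · simp
  · have := altRun_snd_length delimiters rest
    simp
    omega

def expand_delimiters_alt (arg : String) (delimiters : List String) : List String :=
  altGo delimiters arg.toList

-- ===== PRECONDITION & SPEC =====
def Spec_expand_delimiters (arg : String) (delimiters : List String) (out : List String) : Prop := out = expand_delimiters_alt arg delimiters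
instance (arg : String) (delimiters : List String) (out : List String) : Decidable (Spec_expand_delimiters arg delimiters out) := by unfold Spec_expand_delimiters; infer_instance

-- ===== CLAIM (what is proved, stated in full; the proofs are below) =====
def Claim_equal_expand_delimiters : Prop := ∀ (arg : String) (delimiters : List String), Dom_expand_delimiters arg delimiters → Spec_expand_delimiters arg delimiters (expand_delimiters arg delimiters)

-- ===== LEMMAS AND PROOFS =====

-- B's outer loop body generalized with a pending partial token `last`
def altCont (delimiters : List String) (last : List Char) (l : List Char) : List String :=
  (if last ++ (altRun delimiters l).1 = [] then []
   else [String.ofList (last ++ (altRun delimiters l).1)]) ++ altGo delimiters (altRun delimiters l).2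

theorem aAddLast_append (pre : List String) (s : String) (c : Char) :
    aAddLast (pre ++ [s]) c = pre ++ [s.push c] := by
  induction pre with
  | nil => simp [aAddLast]
  | cons x xs ih =>
    cases xs with
    | nil => simp [aAddLast]
    | cons y ys => simpa [aAddLast] using ih

theorem push_ofList (l : List Char) (c : Char) :
    (String.ofList l).push c = String.ofList (l ++ [c]) := by
  apply String.toList_injective; simp

theorem altGo_eq_altCont (delimiters : List String) (l : List Char) :
    altGo delimiters l = altCont delimiters [] l := by
  cases l with
  | nil => simp [altGo, altCont, altRun]
  | cons c t =>
    by_cases h : String.ofList [c] ∈ delimiters <;>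
      simp [altGo, altCont, altRun, h]

theorem foldl_filter (delimiters : List String) (l : List Char) :
    ∀ (pre : List String) (last : List Char),
    (List.foldl (aStep delimiters) (pre ++ [String.ofList last]) l).filter (fun a => a != "")
    = pre.filter (fun a => a != "") ++ altCont delimiters last l := by
  induction l with
  | nil =>
    intro pre last
    simp only [List.foldl_nil, altCont, altRun, List.filter_append, List.append_nil]
    by_cases h : last = [] <;> simp [altGo, h]
  | cons c t ih =>
    intro pre last
    by_cases h : String.ofList [c] ∈ delimiters
    · have hstep : aStep delimiters (pre ++ [String.ofList last]) c
          = (pre ++ [String.ofList last, String.ofList [c]]) ++ [String.ofList ([] : List Char)] := by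
        simp [aStep, h]
      rw [List.foldl_cons, hstep, ih (pre ++ [String.ofList last, String.ofList [c]]) []]
      simp only [altCont, altRun, List.filter_append]
      have hgo := (altGo_eq_altCont delimiters t).symm
      simp only [altCont, List.nil_append] at hgo
      by_cases hl : last = [] <;> simp [altGo, h, hl, hgo]
    · have hstep : aStep delimiters (pre ++ [String.ofList last]) c
          = pre ++ [String.ofList (last ++ [c])] := by
        simp [aStep, h, aAddLast_append, push_ofList]
      rw [List.foldl_cons, hstep, ih pre (last ++ [c])]
      simp [altCont, altRun, h]


-- ===== VERDICT (by name: the statement is the Claim_ definition above) =====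
theorem expand_delimiters_spec : Claim_equal_expand_delimiters := by
  intro arg delimiters _
  show _ = _
  unfold expand_delimiters expand_delimiters_alt
  have he : ("" : String) = String.ofList [] := rfl
  rw [he]
  have h := foldl_filter delimiters arg.toList [] []
  simpa [altGo_eq_altCont] using h
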